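-- pv_equiv track=rewrite | github.com/TheAlexFreeman/engram-harness | engram/core/tools/agent_memory_mcp/tools/semantic/session_tools.py | _access_jsonl_for
-- ===== SOURCE A (Python) =====
-- _ACCESS_ROOTS = (
--     "memory/users",
--     "memory/knowledge",
--     "memory/skills",
--     "memory/working/projects",
--     "memory/activity",
-- )
--
-- def _access_jsonl_for(rel_path: str) -> str | None:
--     # Special case: knowledge/_unverified gets its own ACCESS.jsonl
--     if (
--         rel_path.startswith("memory/knowledge/_unverified/")
--         or rel_path == "memory/knowledge/_unverified"
--     ):
--         return "memory/knowledge/_unverified/ACCESS.jsonl"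
--     for root in _ACCESS_ROOTS:
--         if rel_path == root or rel_path.startswith(root + "/"):
--             return f"{root}/ACCESS.jsonl"
--     return None
-- ===== SOURCE B (Python) =====
-- _ACCESS_ROOTS = (
--     "memory/users",
--     "memory/knowledge",
--     "memory/skills",
--     "memory/working/projects",
--     "memory/activity",
-- )
--
-- def _access_jsonl_for(rel_path: str) -> str | None:
--     # Longest-prefix match over all roots; the _unverified root is longer than
--     # memory/knowledge, so the special case falls out automatically.
--     best = None
--     for root in _ACCESS_ROOTS + ("memory/knowledge/_unverified",):
--         if rel_path == root or rel_path.startswith(root + "/"):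
--             if best is None or len(root) > len(best):
--                 best = root
--     return None if best is None else best + "/ACCESS.jsonl"
-- ===== Notes on version B (the rewrite author's own statement) =====
-- stated objective: simpler
-- what changed: Replaced the hand-written special case plus first-match loop by a single longest-prefix-match scan over the six roots (the five constants plus the _unverified root), which subsumes the special case automatically.
import Mathlib
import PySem

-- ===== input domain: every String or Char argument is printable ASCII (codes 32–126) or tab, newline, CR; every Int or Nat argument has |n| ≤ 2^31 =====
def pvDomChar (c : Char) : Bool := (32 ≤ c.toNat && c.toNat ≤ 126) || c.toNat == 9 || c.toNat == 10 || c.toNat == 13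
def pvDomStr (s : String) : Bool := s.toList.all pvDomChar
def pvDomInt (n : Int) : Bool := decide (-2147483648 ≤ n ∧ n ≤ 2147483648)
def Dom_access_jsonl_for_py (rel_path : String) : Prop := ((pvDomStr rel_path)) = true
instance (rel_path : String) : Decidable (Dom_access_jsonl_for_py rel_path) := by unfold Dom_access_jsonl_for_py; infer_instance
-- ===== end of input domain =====

-- B replaces A's explicit special case plus first-match loop by one longest-prefix-match
-- scan over six roots (objective: simpler decomposition; same cost).

-- ===== PORT A =====
def accessRootsA : List String :=
  ["memory/users", "memory/knowledge", "memory/skills", "memory/working/projects", "memory/activity"]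

-- A's for-loop with early return, as structural recursion over the root list
def accessLoopA (rel_path : String) : List String → Option String
  | [] => none
  | root :: rest =>
    if rel_path == root || PySem.Str.startswith rel_path (root ++ "/") then some (root ++ "/ACCESS.jsonl")
    else accessLoopA rel_path rest

def access_jsonl_for_py (rel_path : String) : Option String :=
  if PySem.Str.startswith rel_path "memory/knowledge/_unverified/" || rel_path == "memory/knowledge/_unverified" then
    some "memory/knowledge/_unverified/ACCESS.jsonl"
  else accessLoopA rel_path accessRootsA

-- ===== PORT B =====
def accessRootsB : List String :=
  ["memory/users", "memory/knowledge", "memory/skills", "memory/working/projects", "memory/activity",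
   "memory/knowledge/_unverified"]

def access_jsonl_for_py_alt (rel_path : String) : Option String :=
  let best := accessRootsB.foldl (fun best root =>
    if rel_path == root || PySem.Str.startswith rel_path (root ++ "/") then
      match best with
      | none => some root
      | some b => if PySem.Str.len root > PySem.Str.len b then some root else some b
    else best) none
  match best with
  | none => none
  | some b => some (b ++ "/ACCESS.jsonl")

-- ===== PRECONDITION & SPEC =====
def Spec_access_jsonl_for_py (rel_path : String) (out : Option String) : Prop := out = access_jsonl_for_py_alt rel_path
instance (rel_path : String) (out : Option String) : Decidable (Spec_access_jsonl_for_py rel_path out) := by unfold Spec_access_jsonl_for_py; infer_instance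

-- ===== CLAIM (what is proved, stated in full; the proofs are below) =====
def Claim_equal_access_jsonl_for_py : Prop := ∀ (rel_path : String), Dom_access_jsonl_for_py rel_path → Spec_access_jsonl_for_py rel_path (access_jsonl_for_py rel_path)

-- ===== LEMMAS AND PROOFS =====

-- a root match (equality or slash-extended prefix) makes root++"/" a prefix of s++"/"
theorem pv_match {s r : String} (h : s = r ∨ (r ++ "/").toList <+: s.toList) :
    (r ++ "/").toList <+: (s.toList ++ ['/']) := by
  rcases h with h | h
  · subst h; simp
  · exact h.trans (List.prefix_append _ _)

-- two roots whose slash-extended forms are prefix-incomparable cannot both match s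
theorem pv_excl {s r1 r2 : String}
    (hab : ¬ (r1 ++ "/").toList <+: (r2 ++ "/").toList)
    (hba : ¬ (r2 ++ "/").toList <+: (r1 ++ "/").toList)
    (h : s = r1 ∨ (r1 ++ "/").toList <+: s.toList) :
    (s == r2 || PySem.Chars.startswith s.toList (r2 ++ "/").toList) = false := by
  have hp1 := pv_match h
  rw [Bool.or_eq_false_iff]
  constructor
  · rw [beq_eq_false_iff_ne]
    intro hs
    exact hab (by simpa [hs] using hp1)
  · rw [Bool.eq_false_iff]
    intro hsw
    have hp2 := pv_match (Or.inr ((PySem.Chars.startswith_iff _ _).mp hsw))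
    rcases List.prefix_or_prefix_of_prefix hp1 hp2 with hc | hc
    · exact hab hc
    · exact hba hc

-- a match of the _unverified root is in particular a match of memory/knowledge
theorem pv_unv {s : String}
    (h : s = "memory/knowledge/_unverified" ∨ ("memory/knowledge/_unverified" ++ "/").toList <+: s.toList) :
    (s == "memory/knowledge" || PySem.Chars.startswith s.toList ("memory/knowledge" ++ "/").toList) = true := by
  rw [Bool.or_eq_true]
  right
  rw [PySem.Chars.startswith_iff]
  rcases h with h | h
  · subst h; decide
  · exact List.IsPrefix.trans (by decide) h

-- the goal on every input matched by the _unverified root, factored out for reuse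
theorem pv_leaf_unv {s : String}
    (h6 : s = "memory/knowledge/_unverified" ∨
      ("memory/knowledge/_unverified" ++ "/").toList <+: s.toList) :
    access_jsonl_for_py s = access_jsonl_for_py_alt s := by
  have e : ("memory/knowledge/_unverified" ++ "/").toList = "memory/knowledge/_unverified/".toList := by decide
  have hA : (PySem.Chars.startswith s.toList "memory/knowledge/_unverified/".toList
      || s == "memory/knowledge/_unverified") = true := by
    rcases h6 with h | h
    · simp [h]
    · rw [Bool.or_eq_true]; left; rw [PySem.Chars.startswith_iff]; rw [e] at h; exact h
  have hB : (s == "memory/knowledge/_unverified"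
      || PySem.Chars.startswith s.toList ("memory/knowledge/_unverified" ++ "/").toList) = true := by
    rcases h6 with h | h
    · simp [h]
    · rw [Bool.or_eq_true]; right; rw [PySem.Chars.startswith_iff]; exact h
  have h2 := pv_unv h6
  have h1 := pv_excl (r2 := "memory/users") (by decide) (by decide) h6
  have h3 := pv_excl (r2 := "memory/skills") (by decide) (by decide) h6
  have h4 := pv_excl (r2 := "memory/working/projects") (by decide) (by decide) h6
  have h5 := pv_excl (r2 := "memory/activity") (by decide) (by decide) h6
  unfold access_jsonl_for_py access_jsonl_for_py_alt accessRootsA accessRootsB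
  simp only [List.foldl, accessLoopA, PySem.Str.startswith_eq]
  simp only [hA, hB, h1, h2, h3, h4, h5, Bool.true_or, Bool.or_true, Bool.false_or,
    Bool.or_false, reduceIte] <;> decide

-- ===== VERDICT (by name: the statement is the Claim_ definition above) =====
theorem access_jsonl_for_py_spec : Claim_equal_access_jsonl_for_py := by
  intro s _
  show access_jsonl_for_py s = access_jsonl_for_py_alt s
  have e : ("memory/knowledge/_unverified" ++ "/").toList = "memory/knowledge/_unverified/".toList := by decide
  by_cases hu : PySem.Chars.startswith s.toList "memory/knowledge/_unverified/".toList = true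
  · exact pv_leaf_unv (Or.inr (by rw [e]; exact (PySem.Chars.startswith_iff _ _).mp hu))
  · by_cases heu : (s == "memory/knowledge/_unverified") = true
    · exact pv_leaf_unv (Or.inl (beq_iff_eq.mp heu))
    · -- the _unverified root does not match; at most one of the five plain roots matches
      have hu2 : PySem.Chars.startswith s.toList ("memory/knowledge/_unverified" ++ "/").toList = false := by
        rw [e]; exact Bool.eq_false_iff.mpr hu
      unfold access_jsonl_for_py access_jsonl_for_py_alt accessRootsA accessRootsB
      simp only [List.foldl, accessLoopA, PySem.Str.startswith_eq]
      by_cases hc1 : (s == "memory/users" || PySem.Chars.startswith s.toList ("memory/users" ++ "/").toList) = true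
      · have h1 : s = "memory/users" ∨ ("memory/users" ++ "/").toList <+: s.toList := by
          simpa [PySem.Chars.startswith_iff] using hc1
        have h2 := pv_excl (r2 := "memory/knowledge") (by decide) (by decide) h1
        have h3 := pv_excl (r2 := "memory/skills") (by decide) (by decide) h1
        have h4 := pv_excl (r2 := "memory/working/projects") (by decide) (by decide) h1
        have h5 := pv_excl (r2 := "memory/activity") (by decide) (by decide) h1
        simp only [Bool.eq_false_iff.mpr hu, hu2, Bool.eq_false_iff.mpr heu, hc1, h2, h3, h4, h5,
          Bool.true_or, Bool.or_true, Bool.false_or, Bool.or_false, reduceIte] <;> decide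
      · by_cases hc2 : (s == "memory/knowledge" || PySem.Chars.startswith s.toList ("memory/knowledge" ++ "/").toList) = true
        · have h2 : s = "memory/knowledge" ∨ ("memory/knowledge" ++ "/").toList <+: s.toList := by
            simpa [PySem.Chars.startswith_iff] using hc2
          have h3 := pv_excl (r2 := "memory/skills") (by decide) (by decide) h2
          have h4 := pv_excl (r2 := "memory/working/projects") (by decide) (by decide) h2
          have h5 := pv_excl (r2 := "memory/activity") (by decide) (by decide) h2
          simp only [Bool.eq_false_iff.mpr hu, hu2, Bool.eq_false_iff.mpr heu, Bool.eq_false_iff.mpr hc1,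
            hc2, h3, h4, h5, Bool.true_or, Bool.or_true, Bool.false_or, Bool.or_false, reduceIte] <;> decide
        · by_cases hc3 : (s == "memory/skills" || PySem.Chars.startswith s.toList ("memory/skills" ++ "/").toList) = true
          · have h3 : s = "memory/skills" ∨ ("memory/skills" ++ "/").toList <+: s.toList := by
              simpa [PySem.Chars.startswith_iff] using hc3
            have h4 := pv_excl (r2 := "memory/working/projects") (by decide) (by decide) h3
            have h5 := pv_excl (r2 := "memory/activity") (by decide) (by decide) h3
            simp only [Bool.eq_false_iff.mpr hu, hu2, Bool.eq_false_iff.mpr heu, Bool.eq_false_iff.mpr hc1,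
              Bool.eq_false_iff.mpr hc2, hc3, h4, h5, Bool.true_or, Bool.or_true, Bool.false_or,
              Bool.or_false, reduceIte] <;> decide
          · by_cases hc4 : (s == "memory/working/projects" || PySem.Chars.startswith s.toList ("memory/working/projects" ++ "/").toList) = true
            · have h4 : s = "memory/working/projects" ∨ ("memory/working/projects" ++ "/").toList <+: s.toList := by
                simpa [PySem.Chars.startswith_iff] using hc4
              have h5 := pv_excl (r2 := "memory/activity") (by decide) (by decide) h4
              simp only [Bool.eq_false_iff.mpr hu, hu2, Bool.eq_false_iff.mpr heu, Bool.eq_false_iff.mpr hc1,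
                Bool.eq_false_iff.mpr hc2, Bool.eq_false_iff.mpr hc3, hc4, h5, Bool.true_or,
                Bool.or_true, Bool.false_or, Bool.or_false, reduceIte] <;> decide
            · by_cases hc5 : (s == "memory/activity" || PySem.Chars.startswith s.toList ("memory/activity" ++ "/").toList) = true
              · simp only [Bool.eq_false_iff.mpr hu, hu2, Bool.eq_false_iff.mpr heu, Bool.eq_false_iff.mpr hc1,
                  Bool.eq_false_iff.mpr hc2, Bool.eq_false_iff.mpr hc3, Bool.eq_false_iff.mpr hc4, hc5,
                  Bool.true_or, Bool.or_true, Bool.false_or, Bool.or_false, reduceIte] <;> decide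
              · simp only [Bool.eq_false_iff.mpr hu, hu2, Bool.eq_false_iff.mpr heu, Bool.eq_false_iff.mpr hc1,
                  Bool.eq_false_iff.mpr hc2, Bool.eq_false_iff.mpr hc3, Bool.eq_false_iff.mpr hc4,
                  Bool.eq_false_iff.mpr hc5, Bool.true_or, Bool.or_true, Bool.false_or, Bool.or_false,
                  reduceIte] <;> decide
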